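-- pv_equiv track=rewrite | github.com/yamaguchigo1923/uruno_ocr_backend | test/label_test/run_label_test.py | align_rows_by_number
-- ===== SOURCE A (Python) =====
-- from typing import Any, Dict, List, Tuple, Optional
--
-- def _score_number(gt: int, ocr: int) -> int:
--     """正解番号とOCR番号の近さに基づくスコア。
--
--     |gt-ocr|==0: +5, 1: +2, 2: +1, それ以外: -3
--     """
--
--     d = abs(gt - ocr)
--     if d == 0:
--         return 5
--     if d == 1:
--         return 2
--     if d == 2:
--         return 1
--     return -3
--
-- def align_rows_by_number(gt_numbers: List[int], ocr_numbers: List[int]) -> List[Tuple[int, int]]: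
--     """番号のみを用いたシーケンスアラインメントで行マッチングを行う。
--
--     入力:
--         gt_numbers: 正解側番号配列 (長さ N)
--         ocr_numbers: OCR側番号配列 (長さ M)
--
--     出力:
--         (gi, oj) のペアリスト。gi/oj は 0 始まりインデックス。
--     """
--
--     n = len(gt_numbers)
--     m = len(ocr_numbers)
--     gap_penalty = -2
--
--     # dp と trace を (n+1) x (m+1) で確保
--     dp: List[List[int]] = [[0] * (m + 1) for _ in range(n + 1)]
--     trace: List[List[int]] = [[0] * (m + 1) for _ in range(n + 1)]
--
--     # 初期化
--     for i in range(1, n + 1):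
--         dp[i][0] = dp[i - 1][0] + gap_penalty
--         trace[i][0] = 1  # 正解側スキップ
--     for j in range(1, m + 1):
--         dp[0][j] = dp[0][j - 1] + gap_penalty
--         trace[0][j] = 2  # OCR側スキップ
--
--     # 遷移
--     for i in range(1, n + 1):
--         for j in range(1, m + 1):
--             match_score = dp[i - 1][j - 1] + _score_number(gt_numbers[i - 1], ocr_numbers[j - 1])
--             skip_gt = dp[i - 1][j] + gap_penalty
--             skip_ocr = dp[i][j - 1] + gap_penalty
--
--             best = match_score
--             t = 0
--             if skip_gt > best:
--                 best = skip_gt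
--                 t = 1
--             if skip_ocr > best:
--                 best = skip_ocr
--                 t = 2
--
--             dp[i][j] = best
--             trace[i][j] = t
--
--     # 復元
--     pairs: List[Tuple[int, int]] = []
--     i, j = n, m
--     while i > 0 or j > 0:
--         t = trace[i][j]
--         if i > 0 and j > 0 and t == 0:
--             # マッチ
--             pairs.append((i - 1, j - 1))
--             i -= 1
--             j -= 1
--         elif i > 0 and (j == 0 or t == 1):
--             # 正解側スキップ (i-1 行目がどの OCR 行にも対応しない)
--             i -= 1
--         elif j > 0 and (i == 0 or t == 2):
--             # OCR側スキップ (j-1 行目がどの 正解 行にも対応しない)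
--             j -= 1
--         else:
--             # 保険: どれにも当てはまらない場合は両方デクリメント
--             if i > 0:
--                 i -= 1
--             if j > 0:
--                 j -= 1
--
--     pairs.reverse()
--     return pairs
-- ===== SOURCE B (Python) =====
-- from typing import List, Tuple
--
--
-- def _score_number(gt: int, ocr: int) -> int:
--     d = abs(gt - ocr)
--     if d == 0:
--         return 5
--     if d == 1:
--         return 2
--     if d == 2:
--         return 1
--     return -3
--
--
-- def align_rows_by_number(gt_numbers: List[int], ocr_numbers: List[int]) -> List[Tuple[int, int]]:
--     """Single rolling-row DP carrying (score, shared cons-path) cells; no trace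
--     table and no backward traceback: each cell stores its best path directly."""
--     gap = -2
--
--     # row 0: aligning an empty gt prefix against each ocr prefix
--     prev = [(0, None)]
--     for _ in ocr_numbers:
--         s, p = prev[-1]
--         prev.append((s + gap, p))
--
--     for i, g in enumerate(gt_numbers):
--         left = (prev[0][0] + gap, prev[0][1])
--         cur = [left]
--         for j, (o, diag, up) in enumerate(zip(ocr_numbers, prev, prev[1:])):
--             ms = diag[0] + _score_number(g, o)
--             sg = up[0] + gap
--             so = left[0] + gap
--             if ms >= sg and ms >= so:
--                 left = (ms, (diag[1], (i, j)))   # match wins all ties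
--             elif sg >= so:
--                 left = (sg, up[1])               # then gt-skip
--             else:
--                 left = (so, left[1])             # then ocr-skip
--             cur.append(left)
--         prev = cur
--
--     out = []
--     node = prev[-1][1]
--     while node is not None:
--         node, pair = node
--         out.append(pair)
--     out.reverse()
--     return out
-- ===== Notes on version B (the rewrite author's own statement) =====
-- stated objective: alternative
-- what changed: A fills full dp and trace matrices and then walks a backward traceback over the trace table; B keeps only one rolling DP row whose cells carry their own best path (a shared cons list), so the trace matrix and the traceback loop disappear and the answer is read off the last cell.
import Mathlib
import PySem

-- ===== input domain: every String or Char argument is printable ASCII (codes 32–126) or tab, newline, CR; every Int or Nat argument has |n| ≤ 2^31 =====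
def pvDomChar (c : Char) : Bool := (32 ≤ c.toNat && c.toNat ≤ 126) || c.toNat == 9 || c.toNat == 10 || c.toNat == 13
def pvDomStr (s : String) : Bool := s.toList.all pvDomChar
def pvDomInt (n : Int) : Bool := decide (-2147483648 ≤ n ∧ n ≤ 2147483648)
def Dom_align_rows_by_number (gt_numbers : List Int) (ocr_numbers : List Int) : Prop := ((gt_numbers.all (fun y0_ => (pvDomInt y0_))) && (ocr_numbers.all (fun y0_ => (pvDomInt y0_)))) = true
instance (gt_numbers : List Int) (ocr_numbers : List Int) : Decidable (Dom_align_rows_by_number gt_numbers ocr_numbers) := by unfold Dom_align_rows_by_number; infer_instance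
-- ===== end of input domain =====

-- B replaces A's trace matrix + backward traceback by a single rolling DP row whose cells carry
-- their own best path (alternative decomposition; same O(n*m) cost, same tie-breaking).


-- ===== PORT A =====

-- _score_number
def pvScore (gt : Int) (ocr : Int) : Int :=
  let d := |gt - ocr|
  if d = 0 then 5
  else if d = 1 then 2
  else if d = 2 then 1
  else -3

-- one in-place write 'tbl[i][j] = v' on a table viewed as a function of its two indices
def pvSet2 (f : Int → Int → Int) (i j : Int) (v : Int) : Int → Int → Int :=
  fun a b => if a = i ∧ b = j then v else f a b

-- the dp/trace filling loops of A, step for step (tables as index functions, zero-initialised)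
def pvTables (gt ocr : List Int) : (Int → Int → Int) × (Int → Int → Int) :=
  let n : Int := gt.length
  let m : Int := ocr.length
  let gap : Int := -2
  let st0 : (Int → Int → Int) × (Int → Int → Int) := (fun _ _ => 0, fun _ _ => 0)
  let st1 := (PySem.List.pyRange 1 (n+1) 1).foldl
      (fun st i => (pvSet2 st.1 i 0 (st.1 (i-1) 0 + gap), pvSet2 st.2 i 0 1)) st0
  let st2 := (PySem.List.pyRange 1 (m+1) 1).foldl
      (fun st j => (pvSet2 st.1 0 j (st.1 0 (j-1) + gap), pvSet2 st.2 0 j 2)) st1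
  (PySem.List.pyRange 1 (n+1) 1).foldl
      (fun st i => (PySem.List.pyRange 1 (m+1) 1).foldl
        (fun st j =>
          let ms := st.1 (i-1) (j-1) +
              pvScore (PySem.List.pyGetD gt (i-1) 0) (PySem.List.pyGetD ocr (j-1) 0)
          let sg := st.1 (i-1) j + gap
          let so := st.1 i (j-1) + gap
          let bt : Int × Int := (ms, 0)
          let bt := if sg > bt.1 then (sg, 1) else bt
          let bt := if so > bt.1 then (so, 2) else bt
          (pvSet2 st.1 i j bt.1, pvSet2 st.2 i j bt.2)) st) st2

-- A's while-loop traceback (pairs appended, then reversed by the caller)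
def pvTraceback (tr : Int → Int → Int) (i j : Int) (pairs : List (Int × Int)) : List (Int × Int) :=
  if hij : i > 0 ∨ j > 0 then
    -- t = trace[i][j], read inline
    if h0 : i > 0 ∧ j > 0 ∧ tr i j = 0 then pvTraceback tr (i-1) (j-1) (pairs ++ [(i-1, j-1)])
    else if h1 : i > 0 ∧ (j = 0 ∨ tr i j = 1) then pvTraceback tr (i-1) j pairs
    else if h2 : j > 0 ∧ (i = 0 ∨ tr i j = 2) then pvTraceback tr i (j-1) pairs
    else pvTraceback tr (if i > 0 then i-1 else i) (if j > 0 then j-1 else j) pairs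
  else pairs
termination_by (i.toNat + j.toNat)
decreasing_by all_goals first | omega | (split_ifs <;> omega)

def align_rows_by_number (gt_numbers : List Int) (ocr_numbers : List Int) : List (Int × Int) :=
  let tr := (pvTables gt_numbers ocr_numbers).2
  (pvTraceback tr (gt_numbers.length : Int) (ocr_numbers.length : Int) []).reverse

-- ===== PORT B =====

-- inner zip loop of Source B: 'for j, (o, diag, up) in enumerate(zip(ocr, prev, prev[1:]))' with the
-- running 'left' cell; a cell is (score, path), the path a shared cons list, newest pair first
def pvRowLoop (g : Int) (i : Int) :
    Int → (Int × List (Int × Int)) → List Int → List (Int × List (Int × Int)) →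
    List (Int × List (Int × Int)) → List (Int × List (Int × Int))
  | j, left, o :: os, diag :: up :: rest, cur =>
      let ms := diag.1 + pvScore g o
      let sg := up.1 + (-2)
      let so := left.1 + (-2)
      let c := if ms ≥ sg ∧ ms ≥ so then (ms, ((i, j) :: diag.2))
               else if sg ≥ so then (sg, up.2)
               else (so, left.2)
      pvRowLoop g i (j+1) c os (up :: rest) (cur ++ [c])
  | _, _, _, _, cur => cur

def align_rows_by_number_alt (gt_numbers : List Int) (ocr_numbers : List Int) : List (Int × Int) :=
  -- row 0: empty gt prefix against each ocr prefix
  let prev0 := ocr_numbers.foldl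
      (fun prev _ =>
        let last := prev.getLastD (0, [])
        prev ++ [(last.1 + (-2), last.2)])
      [((0 : Int), ([] : List (Int × Int)))]
  -- one rolling row per gt element
  let final := (PySem.List.enumerate gt_numbers 0).foldl
      (fun prev ig =>
        let h := prev.headD (0, [])
        let left := (h.1 + (-2), h.2)
        pvRowLoop ig.2 ig.1 0 left ocr_numbers prev [left])
      prev0
  -- the last cell's path, oldest pair first
  ((final.getLastD (0, [])).2).reverse

-- ===== PRECONDITION & SPEC =====
def Spec_align_rows_by_number (gt_numbers : List Int) (ocr_numbers : List Int) (out : List (Int × Int)) : Prop := out = align_rows_by_number_alt gt_numbers ocr_numbers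
instance (gt_numbers : List Int) (ocr_numbers : List Int) (out : List (Int × Int)) : Decidable (Spec_align_rows_by_number gt_numbers ocr_numbers out) := by unfold Spec_align_rows_by_number; infer_instance

-- ===== CLAIM (what is proved, stated in full; the proofs are below) =====
def Claim_equal_align_rows_by_number : Prop := ∀ (gt_numbers : List Int) (ocr_numbers : List Int), Dom_align_rows_by_number gt_numbers ocr_numbers → Spec_align_rows_by_number gt_numbers ocr_numbers (align_rows_by_number gt_numbers ocr_numbers)

-- ===== LEMMAS AND PROOFS =====

-- the common mathematical DP cell: best score and (newest-first) path for the prefixes gt[:i], ocr[:j]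
def cellF (gt ocr : List Int) : Nat → Nat → Int × List (Int × Int)
  | 0, 0 => (0, [])
  | i+1, 0 => ((cellF gt ocr i 0).1 + (-2), (cellF gt ocr i 0).2)
  | 0, j+1 => ((cellF gt ocr 0 j).1 + (-2), (cellF gt ocr 0 j).2)
  | i+1, j+1 =>
      let diag := cellF gt ocr i j
      let up := cellF gt ocr i (j+1)
      let left := cellF gt ocr (i+1) j
      let ms := diag.1 + pvScore (gt.getD i 0) (ocr.getD j 0)
      let sg := up.1 + (-2)
      let so := left.1 + (-2)
      if ms ≥ sg ∧ ms ≥ so then (ms, (((i : Int), (j : Int)) :: diag.2))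
      else if sg ≥ so then (sg, up.2)
      else (so, left.2)
termination_by i j => (i, j)

-- the trace value A stores at each cell, expressed through cellF
def tF (gt ocr : List Int) : Nat → Nat → Int
  | 0, 0 => 0
  | _+1, 0 => 1
  | 0, _+1 => 2
  | i+1, j+1 =>
      let ms := (cellF gt ocr i j).1 + pvScore (gt.getD i 0) (ocr.getD j 0)
      let sg := (cellF gt ocr i (j+1)).1 + (-2)
      let so := (cellF gt ocr (i+1) j).1 + (-2)
      if ms ≥ sg ∧ ms ≥ so then 0 else if sg ≥ so then 1 else 2


-- cellF on the boundaries
lemma cellF_left (gt ocr : List Int) : ∀ i : Nat, cellF gt ocr i 0 = (-2 * (i : Int), []) := by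
  intro i
  induction i with
  | zero => simp [cellF]
  | succ k ih => rw [cellF, ih]; simp; ring

lemma cellF_top (gt ocr : List Int) : ∀ j : Nat, cellF gt ocr 0 j = (-2 * (j : Int), []) := by
  intro j
  induction j with
  | zero => simp [cellF]
  | succ k ih => rw [cellF, ih]; simp; ring

-- A's pick-the-max-with-trace computation equals the single-if form used by cellF/tF
lemma pick_eq (ms sg so : Int) :
    (if so > (if sg > ms then ((sg, (1 : Int)) : Int × Int) else (ms, 0)).1 then ((so, (2 : Int)) : Int × Int)
     else (if sg > ms then (sg, 1) else (ms, 0)))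
    = ((if ms ≥ sg ∧ ms ≥ so then ms else if sg ≥ so then sg else so),
       (if ms ≥ sg ∧ ms ≥ so then (0 : Int) else if sg ≥ so then 1 else 2)) := by
  split_ifs <;> first | rfl | (exfalso; omega)

-- the dp table after the boundary init plus the interior filled for rows < i0 and row i0 up to column j0
def gridDP (gt ocr : List Int) (i0 j0 : Nat) : Int → Int → Int := fun a b =>
  if 1 ≤ a ∧ a ≤ (gt.length : Int) ∧ b = 0 then -2 * a
  else if a = 0 ∧ 1 ≤ b ∧ b ≤ (ocr.length : Int) then -2 * b
  else if (1 ≤ a ∧ a ≤ (i0 : Int) ∧ 1 ≤ b ∧ b ≤ (ocr.length : Int)) ∨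
          (a = (i0 : Int) + 1 ∧ 1 ≤ b ∧ b ≤ (j0 : Int)) then (cellF gt ocr a.toNat b.toNat).1
  else 0

def gridTR (gt ocr : List Int) (i0 j0 : Nat) : Int → Int → Int := fun a b =>
  if 1 ≤ a ∧ a ≤ (gt.length : Int) ∧ b = 0 then 1
  else if a = 0 ∧ 1 ≤ b ∧ b ≤ (ocr.length : Int) then 2
  else if (1 ≤ a ∧ a ≤ (i0 : Int) ∧ 1 ≤ b ∧ b ≤ (ocr.length : Int)) ∨
          (a = (i0 : Int) + 1 ∧ 1 ≤ b ∧ b ≤ (j0 : Int)) then tF gt ocr a.toNat b.toNat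
  else 0

-- reading an already-written (or boundary) cell of the partial table gives the abstract cell value
lemma gridDP_cell (gt ocr : List Int) (i0 j0 a b : Nat)
    (h : (b = 0 ∧ a ≤ gt.length) ∨ (a = 0 ∧ b ≤ ocr.length) ∨
         (1 ≤ a ∧ a ≤ i0 ∧ 1 ≤ b ∧ b ≤ ocr.length) ∨ (a = i0 + 1 ∧ 1 ≤ b ∧ b ≤ j0)) :
    gridDP gt ocr i0 j0 (a : Int) (b : Int) = (cellF gt ocr a b).1 := by
  unfold gridDP
  split_ifs with h1 h2 h3
  · have hb : b = 0 := by exact_mod_cast h1.2.2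
    subst hb; rw [cellF_left]
  · have ha : a = 0 := by exact_mod_cast h2.1
    subst ha; rw [cellF_top]
  · simp
  · -- not written: only the (0,0) corner can land here under h
    have ha : a = 0 := by omega
    have hb : b = 0 := by omega
    subst ha; subst hb; simp [cellF]


-- the three loop bodies of pvTables, named so the fold lemmas can speak about them
def pvF1 (st : (Int → Int → Int) × (Int → Int → Int)) (i : Int) : (Int → Int → Int) × (Int → Int → Int) :=
  (pvSet2 st.1 i 0 (st.1 (i-1) 0 + -2), pvSet2 st.2 i 0 1)

def pvF2 (st : (Int → Int → Int) × (Int → Int → Int)) (j : Int) : (Int → Int → Int) × (Int → Int → Int) :=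
  (pvSet2 st.1 0 j (st.1 0 (j-1) + -2), pvSet2 st.2 0 j 2)

def pvF3row (gt ocr : List Int) (i : Int) (st : (Int → Int → Int) × (Int → Int → Int)) (j : Int) :
    (Int → Int → Int) × (Int → Int → Int) :=
  let ms := st.1 (i-1) (j-1) + pvScore (PySem.List.pyGetD gt (i-1) 0) (PySem.List.pyGetD ocr (j-1) 0)
  let sg := st.1 (i-1) j + -2
  let so := st.1 i (j-1) + -2
  let bt : Int × Int := (ms, 0)
  let bt := if sg > bt.1 then (sg, 1) else bt
  let bt := if so > bt.1 then (so, 2) else bt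
  (pvSet2 st.1 i j bt.1, pvSet2 st.2 i j bt.2)

def pvF3 (gt ocr : List Int) (st : (Int → Int → Int) × (Int → Int → Int)) (i : Int) :
    (Int → Int → Int) × (Int → Int → Int) :=
  (PySem.List.pyRange 1 ((ocr.length : Int)+1) 1).foldl (pvF3row gt ocr i) st

-- table after the first (left-column) init loop has run for i = 1..k
def colDP (k : Nat) : Int → Int → Int := fun a b => if 1 ≤ a ∧ a ≤ (k : Int) ∧ b = 0 then -2 * a else 0
def colTR (k : Nat) : Int → Int → Int := fun a b => if 1 ≤ a ∧ a ≤ (k : Int) ∧ b = 0 then 1 else 0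
-- table after both boundary loops (column full, top row up to k)
def rimDP (n k : Nat) : Int → Int → Int := fun a b =>
  if 1 ≤ a ∧ a ≤ (n : Int) ∧ b = 0 then -2 * a
  else if a = 0 ∧ 1 ≤ b ∧ b ≤ (k : Int) then -2 * b else 0
def rimTR (n k : Nat) : Int → Int → Int := fun a b =>
  if 1 ≤ a ∧ a ≤ (n : Int) ∧ b = 0 then 1
  else if a = 0 ∧ 1 ≤ b ∧ b ≤ (k : Int) then 2 else 0

lemma stage1 (k : Nat) :
    (PySem.List.pyRange 1 ((k : Int)+1) 1).foldl pvF1 (fun _ _ => 0, fun _ _ => 0) = (colDP k, colTR k) := by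
  induction k with
  | zero =>
    rw [show ((0 : Nat) : Int) + 1 = 1 by norm_num, PySem.List.pyRange_one_eq_nil (by norm_num)]
    refine Prod.ext ?_ ?_ <;> funext a b <;> simp only [colDP, colTR] <;> split_ifs with h <;>
      first | rfl | (exfalso; omega)
  | succ k ih =>
    rw [show ((k+1 : Nat) : Int) + 1 = ((k : Int) + 1) + 1 by push_cast; ring,
        PySem.List.pyRange_one_succ_right (by omega), List.foldl_append, ih]
    refine Prod.ext ?_ ?_ <;> funext a b <;>
      simp only [List.foldl_cons, List.foldl_nil, pvF1, pvSet2, colDP, colTR, add_sub_cancel_right] <;> split_ifs <;>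
      first | rfl | omega | (simp only [and_true, true_and, le_refl] at *; omega)

lemma stage2 (n k : Nat) :
    (PySem.List.pyRange 1 ((k : Int)+1) 1).foldl pvF2 (colDP n, colTR n) = (rimDP n k, rimTR n k) := by
  induction k with
  | zero =>
    rw [show ((0 : Nat) : Int) + 1 = 1 by norm_num, PySem.List.pyRange_one_eq_nil (by norm_num)]
    refine Prod.ext ?_ ?_ <;> funext a b <;> simp only [List.foldl_nil, colDP, colTR, rimDP, rimTR] <;>
      split_ifs <;> first | rfl | omega
  | succ k ih =>
    rw [show ((k+1 : Nat) : Int) + 1 = ((k : Int) + 1) + 1 by push_cast; ring,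
        PySem.List.pyRange_one_succ_right (by omega), List.foldl_append, ih]
    refine Prod.ext ?_ ?_ <;> funext a b <;>
      simp only [List.foldl_cons, List.foldl_nil, pvF2, pvSet2, rimDP, rimTR, add_sub_cancel_right] <;> split_ifs <;>
      first | rfl | omega | (simp only [and_true, true_and, le_refl] at *; omega)

lemma rim_eq_grid (gt ocr : List Int) :
    (rimDP gt.length ocr.length, rimTR gt.length ocr.length) = (gridDP gt ocr 0 0, gridTR gt ocr 0 0) := by
  refine Prod.ext ?_ ?_ <;> funext a b <;>
    simp only [rimDP, rimTR, gridDP, gridTR, Nat.cast_zero] <;> split_ifs <;>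
    first | rfl | (exfalso; omega)


-- one-step unfoldings of cellF / tF at an interior cell
lemma cellF_succ (gt ocr : List Int) (i j : Nat) :
    cellF gt ocr (i+1) (j+1) =
      (if (cellF gt ocr i j).1 + pvScore (gt.getD i 0) (ocr.getD j 0) ≥ (cellF gt ocr i (j+1)).1 + -2 ∧
          (cellF gt ocr i j).1 + pvScore (gt.getD i 0) (ocr.getD j 0) ≥ (cellF gt ocr (i+1) j).1 + -2
       then ((cellF gt ocr i j).1 + pvScore (gt.getD i 0) (ocr.getD j 0), (((i : Int), (j : Int)) :: (cellF gt ocr i j).2))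
       else if (cellF gt ocr i (j+1)).1 + -2 ≥ (cellF gt ocr (i+1) j).1 + -2
       then ((cellF gt ocr i (j+1)).1 + -2, (cellF gt ocr i (j+1)).2)
       else ((cellF gt ocr (i+1) j).1 + -2, (cellF gt ocr (i+1) j).2)) := by
  rw [cellF]

lemma cellF_fst (gt ocr : List Int) (i j : Nat) :
    (cellF gt ocr (i+1) (j+1)).1 =
      (if (cellF gt ocr i j).1 + pvScore (gt.getD i 0) (ocr.getD j 0) ≥ (cellF gt ocr i (j+1)).1 + -2 ∧
          (cellF gt ocr i j).1 + pvScore (gt.getD i 0) (ocr.getD j 0) ≥ (cellF gt ocr (i+1) j).1 + -2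
       then (cellF gt ocr i j).1 + pvScore (gt.getD i 0) (ocr.getD j 0)
       else if (cellF gt ocr i (j+1)).1 + -2 ≥ (cellF gt ocr (i+1) j).1 + -2
       then (cellF gt ocr i (j+1)).1 + -2
       else (cellF gt ocr (i+1) j).1 + -2) := by
  rw [cellF_succ]; split_ifs <;> rfl

lemma tF_succ (gt ocr : List Int) (i j : Nat) :
    tF gt ocr (i+1) (j+1) =
      (if (cellF gt ocr i j).1 + pvScore (gt.getD i 0) (ocr.getD j 0) ≥ (cellF gt ocr i (j+1)).1 + -2 ∧
          (cellF gt ocr i j).1 + pvScore (gt.getD i 0) (ocr.getD j 0) ≥ (cellF gt ocr (i+1) j).1 + -2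
       then 0 else if (cellF gt ocr i (j+1)).1 + -2 ≥ (cellF gt ocr (i+1) j).1 + -2 then 1 else 2) := by
  rw [tF]

-- writing the freshly computed cell extends the filled region by one column
lemma write_grid_dp (gt ocr : List Int) (i0 j0 : Nat) (_hi : i0 < gt.length) (hj : j0 < ocr.length) :
    pvSet2 (gridDP gt ocr i0 j0) ((i0+1 : Nat) : Int) ((j0+1 : Nat) : Int) ((cellF gt ocr (i0+1) (j0+1)).1)
      = gridDP gt ocr i0 (j0+1) := by
  funext a b
  by_cases hw : a = ((i0+1 : Nat) : Int) ∧ b = ((j0+1 : Nat) : Int)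
  · rw [pvSet2, if_pos hw]
    obtain ⟨ha, hb⟩ := hw
    subst ha; subst hb
    rw [gridDP]
    rw [if_neg (by push_cast; omega), if_neg (by push_cast; omega), if_pos (by push_cast; omega)]
    simp
  · rw [pvSet2, if_neg hw]
    rw [gridDP, gridDP]
    split_ifs <;> first | rfl | (exfalso; push_cast at *; omega)

lemma write_grid_tr (gt ocr : List Int) (i0 j0 : Nat) (_hi : i0 < gt.length) (hj : j0 < ocr.length) :
    pvSet2 (gridTR gt ocr i0 j0) ((i0+1 : Nat) : Int) ((j0+1 : Nat) : Int) (tF gt ocr (i0+1) (j0+1))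
      = gridTR gt ocr i0 (j0+1) := by
  funext a b
  by_cases hw : a = ((i0+1 : Nat) : Int) ∧ b = ((j0+1 : Nat) : Int)
  · rw [pvSet2, if_pos hw]
    obtain ⟨ha, hb⟩ := hw
    subst ha; subst hb
    rw [gridTR]
    rw [if_neg (by push_cast; omega), if_neg (by push_cast; omega), if_pos (by push_cast; omega)]
    simp
  · rw [pvSet2, if_neg hw]
    rw [gridTR, gridTR]
    split_ifs <;> first | rfl | (exfalso; push_cast at *; omega)

-- one interior step of A's filling loop on the abstract table
lemma stage3_step (gt ocr : List Int) (i0 j0 : Nat) (hi : i0 < gt.length) (hj : j0 < ocr.length) :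
    pvF3row gt ocr ((i0 : Int) + 1) (gridDP gt ocr i0 j0, gridTR gt ocr i0 j0) ((j0 : Int) + 1)
      = (gridDP gt ocr i0 (j0+1), gridTR gt ocr i0 (j0+1)) := by
  have e3 : ((i0 : Int) + 1) = ((i0 + 1 : Nat) : Int) := by push_cast; ring
  have e4 : ((j0 : Int) + 1) = ((j0 + 1 : Nat) : Int) := by push_cast; ring
  have e1 : ((i0 + 1 : Nat) : Int) - 1 = ((i0 : Nat) : Int) := by push_cast; ring
  have e2 : ((j0 + 1 : Nat) : Int) - 1 = ((j0 : Nat) : Int) := by push_cast; ring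
  unfold pvF3row
  simp only [e3, e4]
  simp only [e1, e2, PySem.List.pyGetD_natCast]
  rw [gridDP_cell gt ocr i0 j0 i0 j0 (by omega),
      gridDP_cell gt ocr i0 j0 i0 (j0+1) (by omega),
      gridDP_cell gt ocr i0 j0 (i0+1) j0 (by omega)]
  rw [pick_eq]
  dsimp only
  rw [← cellF_fst, ← tF_succ, write_grid_dp gt ocr i0 j0 hi hj, write_grid_tr gt ocr i0 j0 hi hj]

lemma stage3_inner (gt ocr : List Int) (i0 : Nat) (hi : i0 < gt.length) :
    ∀ j0 : Nat, j0 ≤ ocr.length →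
      (PySem.List.pyRange 1 ((j0 : Int)+1) 1).foldl (pvF3row gt ocr ((i0 : Int) + 1))
          (gridDP gt ocr i0 0, gridTR gt ocr i0 0)
        = (gridDP gt ocr i0 j0, gridTR gt ocr i0 j0) := by
  intro j0
  induction j0 with
  | zero =>
    intro _
    rw [show ((0 : Nat) : Int) + 1 = 1 by norm_num, PySem.List.pyRange_one_eq_nil (by norm_num),
        List.foldl_nil]
  | succ k ih =>
    intro hk
    rw [show ((k+1 : Nat) : Int) + 1 = ((k : Int) + 1) + 1 by push_cast; ring,
        PySem.List.pyRange_one_succ_right (by omega), List.foldl_append, ih (by omega),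
        List.foldl_cons, List.foldl_nil, stage3_step gt ocr i0 k hi (by omega)]

-- a fully filled row re-read as the start state of the next row
lemma grid_shift (gt ocr : List Int) (i0 : Nat) :
    (gridDP gt ocr i0 ocr.length, gridTR gt ocr i0 ocr.length)
      = (gridDP gt ocr (i0+1) 0, gridTR gt ocr (i0+1) 0) := by
  refine Prod.ext ?_ ?_ <;> funext a b <;> simp only [gridDP, gridTR] <;> split_ifs <;>
    first
      | rfl
      | (exfalso; push_cast at *; omega)

lemma stage3_outer (gt ocr : List Int) :
    ∀ i0 : Nat, i0 ≤ gt.length →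
      (PySem.List.pyRange 1 ((i0 : Int)+1) 1).foldl (pvF3 gt ocr)
          (gridDP gt ocr 0 0, gridTR gt ocr 0 0)
        = (gridDP gt ocr i0 0, gridTR gt ocr i0 0) := by
  intro i0
  induction i0 with
  | zero =>
    intro _
    rw [show ((0 : Nat) : Int) + 1 = 1 by norm_num, PySem.List.pyRange_one_eq_nil (by norm_num),
        List.foldl_nil]
  | succ k ih =>
    intro hk
    rw [show ((k+1 : Nat) : Int) + 1 = ((k : Int) + 1) + 1 by push_cast; ring,
        PySem.List.pyRange_one_succ_right (by omega), List.foldl_append, ih (by omega),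
        List.foldl_cons, List.foldl_nil]
    show pvF3 gt ocr _ _ = _
    unfold pvF3
    rw [stage3_inner gt ocr k (by omega) ocr.length (le_refl _), grid_shift]

lemma tables_eq (gt ocr : List Int) :
    pvTables gt ocr = (gridDP gt ocr gt.length 0, gridTR gt ocr gt.length 0) := by
  have h : pvTables gt ocr
      = (PySem.List.pyRange 1 ((gt.length : Int)+1) 1).foldl (pvF3 gt ocr)
          ((PySem.List.pyRange 1 ((ocr.length : Int)+1) 1).foldl pvF2
            ((PySem.List.pyRange 1 ((gt.length : Int)+1) 1).foldl pvF1
              (fun _ _ => 0, fun _ _ => 0))) := rfl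
  rw [h, stage1 gt.length, stage2 gt.length ocr.length, rim_eq_grid gt ocr,
      stage3_outer gt ocr gt.length (le_refl _)]


-- the finished trace table reads as tF on the whole grid
lemma trace_vals (gt ocr : List Int) (a b : Nat) (ha : a ≤ gt.length) (hb : b ≤ ocr.length) :
    gridTR gt ocr gt.length 0 (a : Int) (b : Int) = tF gt ocr a b := by
  match a, b with
  | 0, 0 =>
    simp only [gridTR]
    split_ifs <;> first | (exfalso; omega) | (rw [tF])
  | a+1, 0 =>
    simp only [gridTR]
    split_ifs <;> first | (exfalso; omega) | (rw [tF])
  | 0, b+1 =>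
    simp only [gridTR]
    split_ifs <;> first | (exfalso; omega) | (rw [tF])
  | a+1, b+1 =>
    simp only [gridTR]
    split_ifs <;> first | (exfalso; omega) | simp

-- A's traceback walk collects exactly the path stored in the abstract cell (newest pair first)
lemma traceback_eq (gt ocr : List Int) (tr : Int → Int → Int)
    (htr : ∀ a b : Nat, a ≤ gt.length → b ≤ ocr.length → tr (a : Int) (b : Int) = tF gt ocr a b) :
    ∀ (N a b : Nat) (acc : List (Int × Int)), a + b ≤ N → a ≤ gt.length → b ≤ ocr.length →
      pvTraceback tr (a : Int) (b : Int) acc = acc ++ (cellF gt ocr a b).2 := by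
  intro N
  induction N with
  | zero =>
    intro a b acc hN _ _
    have ha : a = 0 := by omega
    have hb : b = 0 := by omega
    subst ha; subst hb
    rw [pvTraceback, dif_neg (by omega)]
    simp [cellF]
  | succ N ih =>
    intro a b acc hN ha hb
    match a, b with
    | 0, 0 =>
      rw [pvTraceback, dif_neg (by omega)]
      simp [cellF]
    | a+1, 0 =>
      have ht := htr (a+1) 0 ha hb
      rw [tF] at ht
      have e : ((a+1 : Nat) : Int) - 1 = ((a : Nat) : Int) := by push_cast; ring
      rw [pvTraceback, e]
      rw [show cellF gt ocr (a+1) 0 = ((cellF gt ocr a 0).1 + -2, (cellF gt ocr a 0).2) from by rw [cellF]]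
      split_ifs with hO h0 h1 h2 <;>
        first
          | (exfalso; omega)
          | (rw [ih a 0 acc (by omega) (by omega) hb])
    | 0, b+1 =>
      have ht := htr 0 (b+1) ha hb
      rw [tF] at ht
      have e : ((b+1 : Nat) : Int) - 1 = ((b : Nat) : Int) := by push_cast; ring
      rw [pvTraceback, e]
      rw [show cellF gt ocr 0 (b+1) = ((cellF gt ocr 0 b).1 + -2, (cellF gt ocr 0 b).2) from by rw [cellF]]
      split_ifs with hO h0 h1 h2 <;>
        first
          | (exfalso; omega)
          | (rw [ih 0 b acc (by omega) ha (by omega)])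
    | a+1, b+1 =>
      have ht := htr (a+1) (b+1) ha hb
      rw [tF_succ] at ht
      have e1 : ((a+1 : Nat) : Int) - 1 = ((a : Nat) : Int) := by push_cast; ring
      have e2 : ((b+1 : Nat) : Int) - 1 = ((b : Nat) : Int) := by push_cast; ring
      rw [pvTraceback, e1, e2]
      by_cases hC0 : (cellF gt ocr a b).1 + pvScore (gt.getD a 0) (ocr.getD b 0) ≥ (cellF gt ocr a (b+1)).1 + -2 ∧
          (cellF gt ocr a b).1 + pvScore (gt.getD a 0) (ocr.getD b 0) ≥ (cellF gt ocr (a+1) b).1 + -2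
      · rw [if_pos hC0] at ht
        rw [cellF_succ gt ocr a b, if_pos hC0]
        split_ifs with hO h0 h1 h2 <;>
          first
            | (exfalso; omega)
            | (rw [ih a b _ (by omega) (by omega) (by omega)]; simp)
      · rw [if_neg hC0] at ht
        rw [cellF_succ gt ocr a b, if_neg hC0]
        by_cases hC1 : (cellF gt ocr a (b+1)).1 + -2 ≥ (cellF gt ocr (a+1) b).1 + -2
        · rw [if_pos hC1] at ht
          rw [if_pos hC1]
          split_ifs with hO h0 h1 h2 <;>
            first
              | (exfalso; omega)
              | (rw [ih a (b+1) acc (by omega) (by omega) hb])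
        · rw [if_neg hC1] at ht
          rw [if_neg hC1]
          split_ifs with hO h0 h1 h2 <;>
            first
              | (exfalso; omega)
              | (rw [ih (a+1) b acc (by omega) ha (by omega)])


-- ===== B-side =====

-- the row of abstract cells for a fixed gt-prefix length
def rowL (gt ocr : List Int) (i : Nat) : List (Int × List (Int × Int)) :=
  (List.range (ocr.length + 1)).map (fun j => cellF gt ocr i j)

lemma rowL_getElem (gt ocr : List Int) (i j : Nat) (hj : j < ocr.length + 1) :
    (rowL gt ocr i)[j]'(by simp [rowL]; omega) = cellF gt ocr i j := by
  simp [rowL]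

lemma rowL_length (gt ocr : List Int) (i : Nat) : (rowL gt ocr i).length = ocr.length + 1 := by
  simp [rowL]

-- Source B's first loop: appending one gap cell per ocr element
lemma firstRow_fold (gt ocr : List Int) :
    ∀ (xs : List Int) (st : List (Int × List (Int × Int))) (c : Int × List (Int × Int)),
      st.getLast? = some c →
      xs.foldl (fun prev _ => prev ++ [((prev.getLastD (0, [])).1 + -2, (prev.getLastD (0, [])).2)]) st
        = st ++ (List.range xs.length).map (fun t : Nat => (c.1 + -2 * ((t : Int) + 1), c.2)) := by
  intro xs
  induction xs with
  | nil => intro st c _; simp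
  | cons x xs ih =>
    intro st c hc
    rw [List.foldl_cons]
    have hlast : st.getLastD (0, []) = c := by
      rw [List.getLastD_eq_getLast?, hc]; rfl
    rw [hlast, ih (st ++ [(c.1 + -2, c.2)]) (c.1 + -2, c.2) (by rw [List.getLast?_concat])]
    rw [List.append_assoc, List.length_cons, List.range_succ_eq_map, List.map_cons, List.map_map]
    congr 1
    rw [List.singleton_append]
    congr 1
    congr 1
    funext t
    simp only [Function.comp_apply]
    congr 1
    push_cast
    ring

-- the first loop builds exactly row 0
lemma row0_eq (gt ocr : List Int) :
    ocr.foldl (fun prev _ => prev ++ [((prev.getLastD (0, [])).1 + -2, (prev.getLastD (0, [])).2)])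
        [((0 : Int), ([] : List (Int × Int)))]
      = rowL gt ocr 0 := by
  rw [firstRow_fold gt ocr ocr [((0 : Int), ([] : List (Int × Int)))] ((0 : Int), ([] : List (Int × Int))) rfl]
  rw [rowL, show (fun j => cellF gt ocr 0 j) = (fun j : Nat => ((-2 : Int) * (j : Int), ([] : List (Int × Int)))) from
        funext (cellF_top gt ocr)]
  rw [List.range_succ_eq_map, List.map_cons, List.map_map, List.singleton_append]
  congr 1

-- Source B's inner zip loop computes the next row cell by cell
lemma rowLoop_eq (gt ocr : List Int) (i0 : Nat) :
    ∀ (k j0 : Nat), j0 + k = ocr.length → ∀ (cur : List (Int × List (Int × Int))),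
      pvRowLoop (gt.getD i0 0) (i0 : Int) (j0 : Int) (cellF gt ocr (i0+1) j0)
          (ocr.drop j0) ((rowL gt ocr i0).drop j0) cur
        = cur ++ (List.range k).map (fun t => cellF gt ocr (i0+1) (j0+1+t)) := by
  intro k
  induction k with
  | zero =>
    intro j0 hj cur
    have hj0 : j0 = ocr.length := by omega
    subst hj0
    rw [List.drop_length]
    simp [pvRowLoop]
  | succ k ih =>
    intro j0 hj cur
    have hj0 : j0 < ocr.length := by omega
    have hrj : j0 < (rowL gt ocr i0).length := by rw [rowL_length]; omega
    have hrj1 : j0 + 1 < (rowL gt ocr i0).length := by rw [rowL_length]; omega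
    rw [List.drop_eq_getElem_cons hj0,
        List.drop_eq_getElem_cons hrj, List.drop_eq_getElem_cons hrj1,
        rowL_getElem gt ocr i0 j0 (by omega), rowL_getElem gt ocr i0 (j0+1) (by omega)]
    simp only [pvRowLoop]
    have hc : (if (cellF gt ocr i0 j0).1 + pvScore (gt.getD i0 0) ocr[j0] ≥ (cellF gt ocr i0 (j0+1)).1 + -2 ∧
                  (cellF gt ocr i0 j0).1 + pvScore (gt.getD i0 0) ocr[j0] ≥ (cellF gt ocr (i0+1) j0).1 + -2
               then ((cellF gt ocr i0 j0).1 + pvScore (gt.getD i0 0) ocr[j0], (((i0 : Int), (j0 : Int)) :: (cellF gt ocr i0 j0).2))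
               else if (cellF gt ocr i0 (j0+1)).1 + -2 ≥ (cellF gt ocr (i0+1) j0).1 + -2
               then ((cellF gt ocr i0 (j0+1)).1 + -2, (cellF gt ocr i0 (j0+1)).2)
               else ((cellF gt ocr (i0+1) j0).1 + -2, (cellF gt ocr (i0+1) j0).2))
            = cellF gt ocr (i0+1) (j0+1) := by
      rw [cellF_succ, List.getD_eq_getElem ocr 0 hj0]
    rw [hc]
    rw [show ((j0 : Int) + 1) = ((j0 + 1 : Nat) : Int) from by push_cast; ring]
    rw [show (cellF gt ocr i0 (j0+1) :: (rowL gt ocr i0).drop (j0+1+1) : List (Int × List (Int × Int)))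
          = (rowL gt ocr i0).drop (j0+1) from by
        rw [List.drop_eq_getElem_cons hrj1, rowL_getElem gt ocr i0 (j0+1) (by omega)]]
    rw [ih (j0+1) (by omega) (cur ++ [cellF gt ocr (i0+1) (j0+1)])]
    rw [List.append_assoc, List.range_succ_eq_map, List.map_cons, List.map_map, List.singleton_append]
    congr 1
    congr 1
    apply List.map_congr_left
    intro t _
    simp only [Function.comp_apply]
    congr 1
    omega

-- Source B's outer loop advances one row per gt element
lemma outer_eq (gt ocr : List Int) :
    ∀ (xs : List Int) (i0 : Nat), gt.drop i0 = xs →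
      (PySem.List.enumerate xs (i0 : Int)).foldl
          (fun prev ig => pvRowLoop ig.2 ig.1 0
            (((prev.headD (0, [])).1 + -2, (prev.headD (0, [])).2)) ocr prev
            [(((prev.headD (0, [])).1 + -2, (prev.headD (0, [])).2))])
          (rowL gt ocr i0)
        = rowL gt ocr (i0 + xs.length) := by
  intro xs
  induction xs with
  | nil => intro i0 _; simp [PySem.List.enumerate_nil]
  | cons x xs ih =>
    intro i0 hdrop
    rw [PySem.List.enumerate_cons, List.foldl_cons]
    have hhead : (rowL gt ocr i0).headD (0, []) = cellF gt ocr i0 0 := by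
      rw [rowL, List.range_succ_eq_map]; rfl
    have hleft : ((cellF gt ocr i0 0).1 + -2, (cellF gt ocr i0 0).2) = cellF gt ocr (i0+1) 0 := by
      rw [show cellF gt ocr (i0+1) 0 = ((cellF gt ocr i0 0).1 + -2, (cellF gt ocr i0 0).2) from by rw [cellF]]
    have hx : x = gt.getD i0 0 := by
      have h0 : gt[i0]? = some x := by
        have h' := congrArg List.head? hdrop
        rwa [List.head?_drop] at h'
      rw [List.getD_eq_getElem?_getD, h0]; rfl
    have hrow0 := rowLoop_eq gt ocr i0 ocr.length 0 (by simp) [cellF gt ocr (i0+1) 0]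
    rw [List.drop_zero, List.drop_zero] at hrow0
    push_cast at hrow0
    have hrow : pvRowLoop x (i0 : Int) 0 (((rowL gt ocr i0).headD (0, [])).1 + -2, ((rowL gt ocr i0).headD (0, [])).2)
          ocr (rowL gt ocr i0) [(((rowL gt ocr i0).headD (0, [])).1 + -2, ((rowL gt ocr i0).headD (0, [])).2)]
        = rowL gt ocr (i0+1) := by
      rw [hhead, hleft, hx]
      rw [hrow0]
      rw [rowL, List.range_succ_eq_map, List.map_cons, List.map_map]
      simp only [List.cons_append, List.nil_append]
      congr 1
      apply List.map_congr_left
      intro t _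
      simp only [Function.comp_apply]
      congr 1
      omega
    rw [hrow]
    rw [show ((i0 : Int) + 1) = ((i0 + 1 : Nat) : Int) from by push_cast; ring]
    rw [ih (i0+1) (by rw [← List.tail_drop, hdrop]; rfl)]
    congr 1
    simp only [List.length_cons]
    omega

lemma rowL_last (gt ocr : List Int) (i : Nat) :
    (rowL gt ocr i).getLastD (0, []) = cellF gt ocr i ocr.length := by
  rw [List.getLastD_eq_getLast?, List.getLast?_eq_getElem?]
  rw [rowL_length]
  simp only [Nat.add_sub_cancel]
  rw [show (rowL gt ocr i)[ocr.length]? = some ((rowL gt ocr i)[ocr.length]'(by rw [rowL_length]; omega)) from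
        List.getElem?_eq_getElem _]
  rw [rowL_getElem gt ocr i ocr.length (by omega)]
  rfl

-- B computes the last cell's path
lemma alt_eq (gt ocr : List Int) :
    align_rows_by_number_alt gt ocr = ((cellF gt ocr gt.length ocr.length).2).reverse := by
  have hout := outer_eq gt ocr gt 0 (by simp)
  push_cast at hout
  rw [Nat.zero_add] at hout
  unfold align_rows_by_number_alt
  dsimp only
  rw [row0_eq gt ocr, hout, rowL_last]


theorem align_rows_by_number_spec : Claim_equal_align_rows_by_number := by
  intro gt ocr _
  unfold Spec_align_rows_by_number align_rows_by_number
  dsimp only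
  have htr : (pvTables gt ocr).2 = gridTR gt ocr gt.length 0 := by rw [tables_eq]
  rw [htr,
      traceback_eq gt ocr (gridTR gt ocr gt.length 0) (fun a b ha hb => trace_vals gt ocr a b ha hb)
        (gt.length + ocr.length) gt.length ocr.length [] (by omega) (le_refl _) (le_refl _),
      alt_eq]
  simp
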